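-- pv_equiv track=rewrite | github.com/somritabanerjee/CitationMap | analyze_affiliations.py | analyze_affiliations
-- ===== SOURCE A (Python) =====
-- from collections import defaultdict
--
-- def analyze_affiliations(affiliation_data):
--     """
--     Analyze affiliation data and group by affiliation.
--
--     Each entry in affiliation_data is a tuple:
--     (author_name, citing_paper_title, cited_paper_title, affiliation_name)
--     """
--     # Dictionary to store: affiliation -> set of unique author names
--     affiliation_authors = defaultdict(set)
--
--     # Also track which papers each affiliation cited
--     affiliation_papers = defaultdict(list)
--
--     for author_name, citing_paper_title, cited_paper_title, affiliation_name in affiliation_data: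
--         if author_name == 'No_author_found':
--             continue
--
--         affiliation_authors[affiliation_name].add(author_name)
--         affiliation_papers[affiliation_name].append({
--             'author': author_name,
--             'citing_paper': citing_paper_title,
--             'cited_paper': cited_paper_title
--         })
--
--     return affiliation_authors, affiliation_papers
-- ===== SOURCE B (Python) =====
-- from collections import defaultdict
--
-- def analyze_affiliations(affiliation_data):
--     """
--     Analyze affiliation data and group by affiliation.
--
--     Different algorithm: filter once, list the distinct affiliations in first-
--     appearance order, then build each affiliation's paper list by a dedicated
--     scan (comprehension) and assign it once; author sets come from that list.
--     """
--     entries = [e for e in affiliation_data if e[0] != 'No_author_found']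
--
--     order = []
--     for e in entries:
--         if e[3] not in order:
--             order.append(e[3])
--
--     affiliation_authors = defaultdict(set)
--     affiliation_papers = defaultdict(list)
--     for aff in order:
--         papers = [{'author': a, 'citing_paper': ci, 'cited_paper': cd}
--                   for a, ci, cd, f in entries if f == aff]
--         affiliation_papers[aff] = papers
--         affiliation_authors[aff] = set(p['author'] for p in papers)
--
--     return affiliation_authors, affiliation_papers
-- ===== Notes on version B (the rewrite author's own statement) =====
-- stated objective: alternative
-- what changed: Instead of one pass that accumulates both defaultdicts keyed on the fly, B filters the entries, computes the distinct affiliations in first-appearance order, and then builds each affiliation's paper list with its own scan of the entries, assigning each dict value exactly once (group-by-key via per-key scans rather than incremental dict accumulation).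
import Mathlib
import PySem

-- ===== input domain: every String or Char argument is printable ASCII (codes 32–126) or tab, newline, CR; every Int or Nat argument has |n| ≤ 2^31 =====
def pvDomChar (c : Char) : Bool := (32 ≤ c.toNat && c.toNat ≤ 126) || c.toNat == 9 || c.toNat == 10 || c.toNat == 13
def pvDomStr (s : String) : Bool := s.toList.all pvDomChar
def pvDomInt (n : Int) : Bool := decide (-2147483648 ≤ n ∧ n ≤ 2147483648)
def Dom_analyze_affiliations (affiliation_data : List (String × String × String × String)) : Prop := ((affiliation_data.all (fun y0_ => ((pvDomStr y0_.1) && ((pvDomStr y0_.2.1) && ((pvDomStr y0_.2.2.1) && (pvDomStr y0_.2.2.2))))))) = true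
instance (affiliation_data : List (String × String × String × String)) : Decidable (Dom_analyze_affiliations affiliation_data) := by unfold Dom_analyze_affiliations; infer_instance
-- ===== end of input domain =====

-- B groups by a different algorithm: filter, list distinct affiliations in first-appearance
-- order, then build each affiliation's value by a per-key scan and a single assignment
-- (objective: alternative; no speed claim).


-- the dict literal {'author': …, 'citing_paper': …, 'cited_paper': …} as its items list
def pvPaper (a c1 c2 : String) : List (String × String) :=
  [("author", a), ("citing_paper", c1), ("cited_paper", c2)]

-- ===== PORT A =====
-- loop body of A: skip 'No_author_found', otherwise update both defaultdicts
def pvStepA (st : PySem.Dict String (PySem.Set String) × PySem.Dict String (List (List (String × String))))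
    (e : String × String × String × String) :
    PySem.Dict String (PySem.Set String) × PySem.Dict String (List (List (String × String))) :=
  if e.1 == "No_author_found" then st
  else (st.1.modify e.2.2.2 PySem.Set.empty (fun s => PySem.Set.add s e.1),
        st.2.modify e.2.2.2 [] (fun l => l ++ [pvPaper e.1 e.2.1 e.2.2.1]))

def analyze_affiliations (affiliation_data : List (String × String × String × String)) : (List (String × List String)) × (List (String × List (List (String × String)))) :=
  let st := affiliation_data.foldl pvStepA (PySem.Dict.empty, PySem.Dict.empty)
  (st.1.items, st.2.items)

-- ===== PORT B =====
-- p['author'] on a paper dict (always present in the dicts B builds)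
def pvPaperAuthor (p : List (String × String)) : String := (PySem.Dict.mk p).getD "author" ""

-- entries = [e for e in affiliation_data if e[0] != 'No_author_found']
def pvEntries (data : List (String × String × String × String)) : List (String × String × String × String) :=
  data.filter (fun e => !(e.1 == "No_author_found"))

-- the 'order' loop: a plain list kept duplicate-free by 'not in' + append = PySem.Set.add
def pvOrder (es : List (String × String × String × String)) : List String :=
  es.foldl (fun acc e => PySem.Set.add acc e.2.2.2) PySem.Set.empty

-- papers = [ {…} for a, ci, cd, f in entries if f == aff ]
def pvGroupPapers (es : List (String × String × String × String)) (aff : String) : List (List (String × String)) :=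
  (es.filter (fun e => e.2.2.2 == aff)).map (fun e => pvPaper e.1 e.2.1 e.2.2.1)

-- body of B's outer loop: one assignment into each defaultdict
def pvOuterStep (es : List (String × String × String × String))
    (st : PySem.Dict String (PySem.Set String) × PySem.Dict String (List (List (String × String))))
    (aff : String) :
    PySem.Dict String (PySem.Set String) × PySem.Dict String (List (List (String × String))) :=
  let papers := pvGroupPapers es aff
  (st.1.insert aff (PySem.Set.ofList (papers.map pvPaperAuthor)), st.2.insert aff papers)

def analyze_affiliations_alt (affiliation_data : List (String × String × String × String)) : (List (String × List String)) × (List (String × List (List (String × String)))) :=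
  let es := pvEntries affiliation_data
  let st := (pvOrder es).foldl (pvOuterStep es) (PySem.Dict.empty, PySem.Dict.empty)
  (st.1.items, st.2.items)

-- ===== PRECONDITION & SPEC =====
def Spec_analyze_affiliations (affiliation_data : List (String × String × String × String)) (out : (List (String × List String)) × (List (String × List (List (String × String))))) : Prop := out = analyze_affiliations_alt affiliation_data
instance (affiliation_data : List (String × String × String × String)) (out : (List (String × List String)) × (List (String × List (List (String × String))))) : Decidable (Spec_analyze_affiliations affiliation_data out) := by unfold Spec_analyze_affiliations; infer_instance

-- ===== CLAIM (what is proved, stated in full; the proofs are below) =====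
def Claim_equal_analyze_affiliations : Prop := ∀ (affiliation_data : List (String × String × String × String)), Dom_analyze_affiliations affiliation_data → Spec_analyze_affiliations affiliation_data (analyze_affiliations affiliation_data)

-- ===== LEMMAS AND PROOFS =====

-- B's papers-dict loop step, isolated (second component of pvOuterStep)
def pvStepP (d : PySem.Dict String (List (List (String × String))))
    (e : String × String × String × String) : PySem.Dict String (List (List (String × String))) :=
  if e.1 == "No_author_found" then d
  else d.modify e.2.2.2 [] (fun l => l ++ [pvPaper e.1 e.2.1 e.2.2.1])

-- the author-set view of a papers items list / dict
def pvF (l : List (String × List (List (String × String)))) : List (String × PySem.Set String) :=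
  l.map (fun kv => (kv.1, PySem.Set.ofList (kv.2.map pvPaperAuthor)))

def pvAuOf (d : PySem.Dict String (List (List (String × String)))) : PySem.Dict String (PySem.Set String) :=
  PySem.Dict.mk (pvF d.items)

theorem pv_get?_F (l : List (String × List (List (String × String)))) (k : String) :
    (PySem.Dict.mk (pvF l)).get? k =
      ((PySem.Dict.mk l).get? k).map (fun ps => PySem.Set.ofList (ps.map pvPaperAuthor)) := by
  induction l with
  | nil => rfl
  | cons hd tl ih =>
    rw [show pvF (hd :: tl) = (hd.1, PySem.Set.ofList (hd.2.map pvPaperAuthor)) :: pvF tl from rfl,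
      PySem.Dict.get?_mk_cons, PySem.Dict.get?_mk_cons]
    by_cases h : hd.1 == k
    · simp [h]
    · simp only [h, Bool.false_eq_true, if_neg, not_false_eq_true]
      exact ih

theorem pv_contains_F (d : PySem.Dict String (List (List (String × String)))) (k : String) :
    (pvAuOf d).contains k = d.contains k := by
  rw [PySem.Dict.contains_eq_isSome_get?, PySem.Dict.contains_eq_isSome_get?]
  cases d with
  | mk items => simp [pvAuOf, pv_get?_F]

theorem pv_getD_F (d : PySem.Dict String (List (List (String × String)))) (k : String) :
    (pvAuOf d).getD k PySem.Set.empty = PySem.Set.ofList ((d.getD k []).map pvPaperAuthor) := by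
  cases d with
  | mk items =>
    rw [PySem.Dict.getD_eq_get?_getD, PySem.Dict.getD_eq_get?_getD]
    rw [show pvAuOf (PySem.Dict.mk items) = PySem.Dict.mk (pvF items) from rfl, pv_get?_F]
    cases (PySem.Dict.mk items).get? k <;> rfl

theorem pv_F_insert (d : PySem.Dict String (List (List (String × String)))) (k : String)
    (v : List (List (String × String))) :
    pvAuOf (d.insert k v) = (pvAuOf d).insert k (PySem.Set.ofList (v.map pvPaperAuthor)) := by
  have hc := pv_contains_F d k
  apply PySem.Dict.ext
  simp only [pvAuOf] at hc ⊢
  by_cases h : d.contains k = true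
  · rw [PySem.Dict.items_insert_of_contains _ _ h,
        PySem.Dict.items_insert_of_contains _ _ (by rw [hc]; exact h)]
    simp only [pvF, List.map_map]
    apply List.map_congr_left
    intro p _
    by_cases hk : p.1 = k <;> simp [hk]
  · rw [PySem.Dict.items_insert_of_not_contains _ _ (by simpa using h),
        PySem.Dict.items_insert_of_not_contains _ _ (by rw [hc]; simpa using h)]
    simp [pvF]

theorem pv_ofList_concat {α : Type} [BEq α] (xs : List α) (y : α) :
    PySem.Set.ofList (xs ++ [y]) = PySem.Set.add (PySem.Set.ofList xs) y := by
  rw [PySem.Set.ofList_eq_foldl, PySem.Set.ofList_eq_foldl, List.foldl_append]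
  rfl

theorem pv_paperAuthor_paper (a c1 c2 : String) : pvPaperAuthor (pvPaper a c1 c2) = a := by
  simp [pvPaperAuthor, pvPaper, PySem.Dict.getD_eq_get?_getD, PySem.Dict.get?_mk_cons]

-- the loop step of A is the papers-dict step, with the author view carried along
theorem pv_step_comm (d : PySem.Dict String (List (List (String × String))))
    (e : String × String × String × String) :
    pvStepA (pvAuOf d, d) e = (pvAuOf (pvStepP d e), pvStepP d e) := by
  by_cases h : e.1 == "No_author_found"
  · simp [pvStepA, pvStepP, h]
  · simp only [pvStepA, pvStepP, h, if_neg, Bool.false_eq_true, not_false_eq_true]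
    refine Prod.ext ?_ rfl
    dsimp only
    show (pvAuOf d).modify _ _ _ = pvAuOf (d.modify _ _ _)
    rw [PySem.Dict.modify, PySem.Dict.modify, pv_F_insert, pv_getD_F]
    simp [pv_ofList_concat, pv_paperAuthor_paper]

-- the whole loop of A equals the papers-dict loop with the author view carried along
theorem pv_fold_comm (data : List (String × String × String × String))
    (d : PySem.Dict String (List (List (String × String)))) :
    data.foldl pvStepA (pvAuOf d, d) = (pvAuOf (data.foldl pvStepP d), data.foldl pvStepP d) := by
  induction data generalizing d with
  | nil => rfl
  | cons hd tl ih => rw [List.foldl_cons, List.foldl_cons, pv_step_comm, ih]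

-- folding the guarded step over data = folding it over the filtered entries
theorem pv_fold_filter (data : List (String × String × String × String))
    (d : PySem.Dict String (List (List (String × String)))) :
    data.foldl pvStepP d = (pvEntries data).foldl pvStepP d := by
  induction data generalizing d with
  | nil => rfl
  | cons hd tl ih =>
    by_cases h : hd.1 == "No_author_found"
    · rw [List.foldl_cons, show pvStepP d hd = d by simp [pvStepP, h],
        show pvEntries (hd :: tl) = pvEntries tl by simp [pvEntries, h]]
      exact ih d
    · rw [List.foldl_cons,
        show pvEntries (hd :: tl) = hd :: pvEntries tl by simp [pvEntries, h], List.foldl_cons]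
      exact ih _

-- over the filtered entries the guard never fires: the fold is a modify-append over (key, value) pairs
theorem pv_fold_pairs (es : List (String × String × String × String))
    (hes : ∀ e ∈ es, (e.1 == "No_author_found") = false)
    (d : PySem.Dict String (List (List (String × String)))) :
    es.foldl pvStepP d =
      (es.map (fun e => (e.2.2.2, pvPaper e.1 e.2.1 e.2.2.1))).foldl
        (fun d p => d.modify p.1 [] (fun l => l ++ [p.2])) d := by
  rw [List.foldl_map]
  induction es generalizing d with
  | nil => rfl
  | cons hd tl ih =>
    rw [List.foldl_cons, List.foldl_cons, show pvStepP d hd = d.modify hd.2.2.2 []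
      (fun l => l ++ [pvPaper hd.1 hd.2.1 hd.2.2.1]) by
        simp [pvStepP, hes hd (List.mem_cons_self ..)]]
    exact ih (fun e he => hes e (List.mem_cons_of_mem _ he)) _

-- B's order list is the set of affiliation keys in first-appearance order
theorem pv_order_eq (es : List (String × String × String × String)) :
    pvOrder es = PySem.Set.ofList (es.map (fun e => e.2.2.2)) := by
  rw [pvOrder, ← PySem.Set.update_map_eq_foldl_add]
  exact PySem.Set.update_empty _

-- B's pair of fresh-key insert loops splits into two independent folds
theorem pv_pair_split (es : List (String × String × String × String)) (order : List String)
    (au : PySem.Dict String (PySem.Set String)) (pa : PySem.Dict String (List (List (String × String)))) :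
    order.foldl (pvOuterStep es) (au, pa) =
      (order.foldl (fun d k => d.insert k (PySem.Set.ofList ((pvGroupPapers es k).map pvPaperAuthor))) au,
       order.foldl (fun d k => d.insert k (pvGroupPapers es k)) pa) := by
  induction order generalizing au pa with
  | nil => rfl
  | cons hd tl ih => rw [List.foldl_cons, List.foldl_cons, List.foldl_cons, pvOuterStep]; exact ih _ _

-- ===== VERDICT (by name: the statement is the Claim_ definition above) =====
theorem analyze_affiliations_spec : Claim_equal_analyze_affiliations := by
  intro data _
  show analyze_affiliations data = analyze_affiliations_alt data
  unfold analyze_affiliations analyze_affiliations_alt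
  dsimp only
  have hes : ∀ e ∈ pvEntries data, (e.1 == "No_author_found") = false := by
    intro e he
    have := List.of_mem_filter he
    simpa using this
  set es := pvEntries data with hesdef
  set pa := data.foldl pvStepP PySem.Dict.empty with hpa
  -- A's fold carries the author view of the papers dict
  rw [show ((PySem.Dict.empty : PySem.Dict String (PySem.Set String)),
      (PySem.Dict.empty : PySem.Dict String (List (List (String × String))))) =
      (pvAuOf PySem.Dict.empty, PySem.Dict.empty) from rfl, pv_fold_comm]
  -- characterize the papers dict: keys and per-key values
  have hpairs : pa = (es.map (fun e => (e.2.2.2, pvPaper e.1 e.2.1 e.2.2.1))).foldl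
      (fun d p => d.modify p.1 [] (fun l => l ++ [p.2])) PySem.Dict.empty := by
    rw [hpa, pv_fold_filter, pv_fold_pairs es hes]
  have hkeys : pa.keys = PySem.Set.ofList (es.map (fun e => e.2.2.2)) := by
    rw [hpairs, PySem.Dict.keys_foldl_modify_key, PySem.Dict.keys_empty,
      PySem.Set.update_nil_left, List.map_map]
    rfl
  have hnd : pa.keys.Nodup := by
    rw [hkeys]; exact PySem.Set.nodup_ofList _
  have hgetD : ∀ k, pa.getD k [] = pvGroupPapers es k := by
    intro k
    rw [hpairs, PySem.Dict.getD_foldl_modify_append, PySem.Dict.getD_empty]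
    rw [pvGroupPapers, List.filter_map, List.map_map]
    rfl
  have hitems : pa.items = (pvOrder es).map (fun k => (k, pvGroupPapers es k)) := by
    rw [PySem.Dict.items_eq_map_keys pa hnd ([] : List (List (String × String))), hkeys,
      ← pv_order_eq]
    exact List.map_congr_left (fun k _ => by rw [hgetD k])
  -- B's side: two fresh-insert loops over the nodup order list
  have hndo : (pvOrder es).Nodup := by rw [pv_order_eq]; exact PySem.Set.nodup_ofList _
  rw [pv_pair_split, show pvAuOf PySem.Dict.empty = (PySem.Dict.empty : PySem.Dict String (PySem.Set String)) from rfl]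
  have hBpa : ((pvOrder es).foldl (fun d k => d.insert k (pvGroupPapers es k))
      (PySem.Dict.empty : PySem.Dict String (List (List (String × String))))).items =
      (pvOrder es).map (fun k => (k, pvGroupPapers es k)) := by
    rw [PySem.Dict.items_foldl_insert_fresh _ _ _ _ (fun a _ => PySem.Dict.contains_empty a)
      (by simpa using hndo)]
    rfl
  have hBau : ((pvOrder es).foldl
      (fun d k => d.insert k (PySem.Set.ofList ((pvGroupPapers es k).map pvPaperAuthor)))
      (PySem.Dict.empty : PySem.Dict String (PySem.Set String))).items =
      (pvOrder es).map (fun k => (k, PySem.Set.ofList ((pvGroupPapers es k).map pvPaperAuthor))) := by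
    rw [PySem.Dict.items_foldl_insert_fresh _ _ _ _ (fun a _ => PySem.Dict.contains_empty a)
      (by simpa using hndo)]
    rfl
  refine Prod.ext ?_ ?_
  · show (pvAuOf pa).items = _
    rw [hBau, pvAuOf, show (PySem.Dict.mk (pvF pa.items)).items = pvF pa.items from rfl,
      hitems, pvF, List.map_map]
    rfl
  · show pa.items = _
    rw [hBpa, hitems]
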